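-- pv_equiv track=rewrite | github.com/Egeyae/egeya-advent-of-code | aoc2016_7.py | has_abba
-- ===== SOURCE A (Python) =====
-- def has_abba(s):
--     for i in range(len(s) - 3):
--         if s[i] != s[i + 1]:
--             s1 = s[i] + s[i + 1]
--             s2 = s[i + 2] + s[i + 3]
--
--             if s1[::-1] == s2:
--                 return True
--     return False
-- ===== SOURCE B (Python) =====
-- def has_abba(s):
--     # Stage 1: collect the distinct characters; Stage 2: for each ordered pair
--     # of distinct characters, test whether the candidate pattern a+b+b+a occurs
--     # anywhere in s as a substring.
--     seen = set(s)
--     return any(a + b + b + a in s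
--                for a in seen for b in seen if a != b)
-- ===== Notes on version B (the rewrite author's own statement) =====
-- stated objective: alternative
-- what changed: Instead of scanning 4-char windows, B enumerates candidate ABBA patterns from the set of distinct characters of s and tests each pattern a+b+b+a for substring occurrence; correct because an ABBA window exists iff some such pattern is a substring.
import Mathlib
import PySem

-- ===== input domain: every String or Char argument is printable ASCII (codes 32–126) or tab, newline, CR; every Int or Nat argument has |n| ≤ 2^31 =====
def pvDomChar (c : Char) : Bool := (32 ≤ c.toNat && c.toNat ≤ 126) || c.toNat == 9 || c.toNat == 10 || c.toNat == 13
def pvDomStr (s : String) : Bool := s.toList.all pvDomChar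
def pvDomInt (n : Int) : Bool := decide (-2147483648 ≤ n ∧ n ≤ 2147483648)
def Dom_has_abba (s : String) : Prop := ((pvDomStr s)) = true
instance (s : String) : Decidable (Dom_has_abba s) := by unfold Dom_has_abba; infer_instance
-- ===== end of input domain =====

-- B replaces A's sliding-window index scan by a pattern-enumeration algorithm:
-- it builds the set of distinct characters of s and substring-tests each candidate
-- pattern a+b+b+a (a ≠ b); objective: alternative algorithm, not faster.

-- ===== PORT A =====
-- the for-loop with early `return True`, as a recursion over the index list;
-- s[i] on a string = pyGet? on its code points; the `| _ => ...` arms are unreachable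
-- (every i from range(len(s)-3) makes all four indices in range)
def pvLoopA (l : List Char) : List Int → Bool
  | [] => false
  | i :: rest =>
    match PySem.List.pyGet? l i, PySem.List.pyGet? l (i + 1),
          PySem.List.pyGet? l (i + 2), PySem.List.pyGet? l (i + 3) with
    | some a, some b, some c, some d =>
        if a ≠ b then
          let s1 := [a, b]
          let s2 := [c, d]
          -- s1[::-1] on a 2-character string is exactly its reversal
          if s1.reverse == s2 then true else pvLoopA l rest
        else pvLoopA l rest
    | _, _, _, _ => pvLoopA l rest

def has_abba (s : String) : Bool :=
  pvLoopA s.toList (PySem.List.pyRange 0 ((s.toList.length : Int) - 3) 1)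

-- ===== PORT B =====
def has_abba_alt (s : String) : Bool :=
  let seen : PySem.Set Char := PySem.Set.ofList s.toList
  -- `a + b + b + a in s` = substring test, PySem.Chars.isIn on the code points
  seen.any (fun a => seen.any (fun b =>
    (a ≠ b : Bool) && PySem.Chars.isIn [a, b, b, a] s.toList))

-- ===== PRECONDITION & SPEC =====
def Spec_has_abba (s : String) (out : Bool) : Prop := out = has_abba_alt s
instance (s : String) (out : Bool) : Decidable (Spec_has_abba s out) := by unfold Spec_has_abba; infer_instance

-- ===== CLAIM (what is proved, stated in full; the proofs are below) =====
def Claim_equal_has_abba : Prop := ∀ (s : String), Dom_has_abba s → Spec_has_abba s (has_abba s)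

-- ===== LEMMAS AND PROOFS =====

-- the loop body on a Nat index, after the casts are pushed in
def pvNatCheck (l : List Char) (k : Nat) : Bool :=
  match l[k]?, l[k + 1]?, l[k + 2]?, l[k + 3]? with
  | some a, some b, some c, some d =>
      if a ≠ b then ([a, b].reverse == [c, d]) else false
  | _, _, _, _ => false

-- the common characterisation both programs are reduced to
def pvAbba (l : List Char) : Prop :=
  ∃ a b : Char, a ≠ b ∧ [a, b, b, a] <:+: l

-- pvLoopA is `any` of its body over the index list
theorem pvLoopA_eq_any (l : List Char) (idxs : List Int) :
    pvLoopA l idxs = idxs.any (fun i =>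
      match PySem.List.pyGet? l i, PySem.List.pyGet? l (i + 1),
            PySem.List.pyGet? l (i + 2), PySem.List.pyGet? l (i + 3) with
      | some a, some b, some c, some d =>
          if a ≠ b then ([a, b].reverse == [c, d]) else false
      | _, _, _, _ => false) := by
  induction idxs with
  | nil => simp [pvLoopA]
  | cons i rest ih =>
    simp only [pvLoopA, List.any_cons, ih]
    rcases h1 : PySem.List.pyGet? l i with _ | a <;>
    rcases h2 : PySem.List.pyGet? l (i + 1) with _ | b <;>
    rcases h3 : PySem.List.pyGet? l (i + 2) with _ | c <;>
    rcases h4 : PySem.List.pyGet? l (i + 3) with _ | d <;>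
      simp only [Bool.false_or] <;>
      (try split_ifs with hab hrev) <;>
      first
        | rfl
        | rw [hrev, Bool.true_or]
        | (simp only [Bool.not_eq_true] at hrev; rw [hrev, Bool.false_or])

theorem pvCheck_cast (l : List Char) (k : Nat) :
    (match PySem.List.pyGet? l (k : Int), PySem.List.pyGet? l ((k : Int) + 1),
           PySem.List.pyGet? l ((k : Int) + 2), PySem.List.pyGet? l ((k : Int) + 3) with
      | some a, some b, some c, some d =>
          if a ≠ b then ([a, b].reverse == [c, d]) else false
      | _, _, _, _ => false) = pvNatCheck l k := by
  have e1 : (k : Int) + 1 = ((k + 1 : Nat) : Int) := by push_cast; ring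
  have e2 : (k : Int) + 2 = ((k + 2 : Nat) : Int) := by push_cast; ring
  have e3 : (k : Int) + 3 = ((k + 3 : Nat) : Int) := by push_cast; ring
  rw [e1, e2, e3]
  simp only [pvNatCheck, PySem.List.pyGet?_natCast]

-- the single ABBA test at position 0 of a long-enough list
theorem pvNatCheck_head (a b c d : Char) (r : List Char) :
    pvNatCheck (a :: b :: c :: d :: r) 0 =
      ((a ≠ b : Bool) && a == d && b == c) := by
  simp only [pvNatCheck]
  by_cases hab : a = b <;> by_cases had : a = d <;> by_cases hbc : b = c <;>
    simp_all [Bool.and_comm]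

theorem pvNatCheck_succ (x : Char) (t : List Char) (k : Nat) :
    pvNatCheck (x :: t) (k + 1) = pvNatCheck t k := by
  simp [pvNatCheck]

-- A's window scan detects exactly pvAbba
theorem pvA_char (l : List Char) :
    (List.range (l.length - 3)).any (pvNatCheck l) = true ↔ pvAbba l := by
  induction l with
  | nil =>
    simp only [List.length_nil, pvAbba]
    constructor
    · intro h; exact absurd h (by decide)
    · rintro ⟨a, b, -, h⟩
      have := h.length_le; simp at this
  | cons x t ih =>
    match t with
    | [] =>
      simp only [pvAbba]
      constructor
      · intro h; simp at h
      · rintro ⟨a, b, -, h⟩; have := h.length_le; simp at this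
    | [b'] =>
      simp only [pvAbba]
      constructor
      · intro h; simp at h
      · rintro ⟨a, b, -, h⟩; have := h.length_le; simp at this
    | [b', c'] =>
      simp only [pvAbba]
      constructor
      · intro h; simp at h
      · rintro ⟨a, b, -, h⟩; have := h.length_le; simp at this
    | b :: c :: d :: r =>
      have hshift : pvNatCheck (x :: b :: c :: d :: r) ∘ Nat.succ
          = pvNatCheck (b :: c :: d :: r) :=
        funext fun k => pvNatCheck_succ x _ k
      have hlen : (x :: b :: c :: d :: r).length - 3 = r.length + 1 := by simp
      have hlent : (b :: c :: d :: r).length - 3 = r.length := by simp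
      rw [hlent] at ih
      rw [hlen, List.range_succ_eq_map, List.any_cons, List.any_map, hshift,
        pvNatCheck_head]
      constructor
      · intro h
        rcases Bool.or_eq_true_iff.mp h with h0 | htail
        · simp only [Bool.and_eq_true, decide_eq_true_eq, beq_iff_eq, ne_eq] at h0
          obtain ⟨⟨hne, hd⟩, hc⟩ := h0
          refine ⟨x, b, hne, ?_⟩
          subst hc; subst hd
          exact ⟨[], r, by simp⟩
        · obtain ⟨a', b'', hne, hinf⟩ := ih.mp htail
          exact ⟨a', b'', hne, hinf.trans (List.suffix_cons x _).isInfix⟩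
      · rintro ⟨a', b'', hne, hinf⟩
        rcases List.infix_cons_iff.mp hinf with hpre | hinf'
        · -- [a',b'',b'',a'] <+: x::b::c::d::r forces the head window to match
          obtain ⟨suf, hsuf⟩ := hpre
          simp only [List.cons_append, List.nil_append, List.cons.injEq] at hsuf
          obtain ⟨h1, h2, h3, h4, -⟩ := hsuf
          apply Bool.or_eq_true_iff.mpr; left
          subst h1; subst h2; subst h3; subst h4
          simp [hne]
        · exact Bool.or_eq_true_iff.mpr (.inr (ih.mpr ⟨a', b'', hne, hinf'⟩))

-- B's pattern enumeration detects exactly pvAbba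
theorem pvB_char (l : List Char) :
    ((PySem.Set.ofList l).any (fun a => (PySem.Set.ofList l).any (fun b =>
      (a ≠ b : Bool) && PySem.Chars.isIn [a, b, b, a] l))) = true ↔ pvAbba l := by
  simp only [List.any_eq_true, Bool.and_eq_true, decide_eq_true_eq,
    PySem.Chars.isIn_iff_infix, pvAbba]
  constructor
  · rintro ⟨a, -, b, -, hne, hinf⟩
    exact ⟨a, b, hne, hinf⟩
  · rintro ⟨a, b, hne, hinf⟩
    have ha : a ∈ l := hinf.subset (by simp)
    have hb : b ∈ l := hinf.subset (by simp)
    exact ⟨a, (PySem.Set.mem_ofList _ _).mpr ha, b,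
      (PySem.Set.mem_ofList _ _).mpr hb, hne, hinf⟩

-- ===== VERDICT (by name: the statement is the Claim_ definition above) =====
theorem has_abba_spec : Claim_equal_has_abba := by
  intro s _
  unfold Spec_has_abba has_abba has_abba_alt
  rw [pvLoopA_eq_any, PySem.List.pyRange_one]
  have hn : (((s.toList.length : Int) - 3) - 0).toNat = s.toList.length - 3 := by omega
  rw [hn, List.any_map]
  have hfun : ((fun i =>
      match PySem.List.pyGet? s.toList i, PySem.List.pyGet? s.toList (i + 1),
            PySem.List.pyGet? s.toList (i + 2), PySem.List.pyGet? s.toList (i + 3) with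
      | some a, some b, some c, some d =>
          if a ≠ b then ([a, b].reverse == [c, d]) else false
      | _, _, _, _ => false) ∘ (fun k : Nat => (0 : Int) + k))
      = pvNatCheck s.toList := by
    funext k
    simp only [Function.comp_apply, zero_add]
    exact pvCheck_cast s.toList k
  rw [hfun]
  rw [Bool.eq_iff_iff, pvA_char, ← pvB_char s.toList]
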